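-- pv_equiv track=rewrite | github.com/JinnZ2/Resilience | octahedral-nfs/src/holographic.py | build_holographic_tables
-- ===== SOURCE A (Python) =====
-- from collections import defaultdict
--
-- def build_holographic_tables(factor_base, levels=None):
--     """
--     Precompute residue tables for each octahedral level.
--
--     Tables map: residue mod product(level) -> possible prime factors
--     """
--     if levels is None:
--         # Group primes into levels of 3
--         levels = [factor_base[i:i+3] for i in range(0, len(factor_base), 3)]
--
--     level_tables = []
--     level_products = []
--
--     for level in levels:
--         if not level:
--             level_tables.append({})
--             level_products.append(1)
--             continue
--
--         prod = 1
--         for p in level: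
--             prod *= p
--
--         # Build residue map
--         residue_map = defaultdict(list)
--         for p in level:
--             for residue in range(0, prod, p):
--                 residue_map[residue].append(p)
--
--         level_tables.append(residue_map)
--         level_products.append(prod)
--
--     return level_tables, level_products
-- ===== SOURCE B (Python) =====
-- from collections import defaultdict
--
--
-- def _chunk3(xs):
--     return [] if not xs else [xs[:3]] + _chunk3(xs[3:])
--
--
-- def _level_table(level, prod):
--     cols = [(p, range(0, prod, p)) for p in level]
--     keys = dict.fromkeys(r for _, rng in cols for r in rng)
--     return defaultdict(list, {r: [p for p, rng in cols if r in rng] for r in keys})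
--
--
-- def build_holographic_tables(factor_base, levels=None):
--     """Precompute residue tables for each octahedral level.
--
--     Tables map: residue mod product(level) -> possible prime factors.
--     """
--     if levels is None:
--         levels = _chunk3(factor_base)
--
--     level_tables = []
--     level_products = []
--     for level in levels:
--         if not level:
--             level_tables.append({})
--             level_products.append(1)
--             continue
--         prod = 1
--         for p in level:
--             prod *= p
--         level_tables.append(_level_table(level, prod))
--         level_products.append(prod)
--     return level_tables, level_products
-- ===== Notes on version B (the rewrite author's own statement) =====
-- stated objective: alternative
-- what changed: Per level, B first enumerates the distinct residues once (ordered dedup of the per-prime ranges) and then computes each residue's complete factor list with a range-membership comprehension, instead of A's incremental defaultdict appends while walking each prime's multiples; B also chunks the factor base recursively instead of A's index/slice comprehension; Pre_ only excludes effective levels containing 0, where both A and B raise ValueError (range step 0).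
import Mathlib
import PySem

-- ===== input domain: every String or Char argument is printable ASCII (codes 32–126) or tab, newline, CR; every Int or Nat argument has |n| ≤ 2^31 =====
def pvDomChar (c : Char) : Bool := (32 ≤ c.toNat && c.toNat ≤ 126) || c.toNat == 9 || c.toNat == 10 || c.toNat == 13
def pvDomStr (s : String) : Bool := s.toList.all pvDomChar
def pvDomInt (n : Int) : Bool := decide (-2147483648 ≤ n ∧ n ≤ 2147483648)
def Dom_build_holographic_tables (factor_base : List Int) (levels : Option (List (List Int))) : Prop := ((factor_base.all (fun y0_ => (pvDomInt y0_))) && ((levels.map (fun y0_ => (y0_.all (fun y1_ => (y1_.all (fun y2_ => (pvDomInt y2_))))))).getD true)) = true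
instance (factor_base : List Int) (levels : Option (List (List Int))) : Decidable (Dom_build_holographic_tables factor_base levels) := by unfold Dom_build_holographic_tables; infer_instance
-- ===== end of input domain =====

-- B builds each level's table in two phases (ordered dedup of the per-prime ranges,
-- then a range-membership comprehension per residue) instead of A's incremental
-- defaultdict appends; same return value on all inputs admitted by Pre_ (objective: alternative).

-- ===== PORT A =====
def build_holographic_tables (factor_base : List Int) (levels : Option (List (List Int))) : (List (List (Int × List Int))) × List Int :=
  let lvls : List (List Int) :=
    match levels with
    | none => (PySem.List.pyRange 0 (factor_base.length : Int) 3).map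
        (fun i => PySem.List.slice factor_base (some i) (some (i + 3)))
    | some ls => ls
  lvls.foldl
    (fun acc level =>
      if level = [] then (acc.1 ++ [([] : List (Int × List Int))], acc.2 ++ [(1 : Int)])
      else
        let prod := level.foldl (fun pr p => pr * p) 1
        let rm := level.foldl
          (fun d p => (PySem.List.pyRange 0 prod p).foldl
            (fun (d : PySem.Dict Int (List Int)) r => d.modify r [] (fun v => v ++ [p])) d)
          PySem.Dict.empty
        (acc.1 ++ [rm.items], acc.2 ++ [prod]))
    ([], [])

-- ===== PORT B =====
-- _chunk3(xs)
def pvChunk3 (xs : List Int) : List (List Int) :=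
  if xs = [] then []
  else PySem.List.slice xs none (some 3) :: pvChunk3 (PySem.List.slice xs (some 3) none)
termination_by xs.length
decreasing_by
  rw [PySem.List.slice_from _ (by norm_num)]
  simp only [List.length_drop]
  have : xs.length ≠ 0 := by simp_all
  omega

-- _level_table(level, prod); a range object's member test 'r in rng' is
-- list membership in PySem.List.pyRange (exact: pyRange lists range's elements)
def pvLevelTable (level : List Int) (prod : Int) : List (Int × List Int) :=
  let cols := level.map (fun p => (p, PySem.List.pyRange 0 prod p))
  let keys := PySem.List.dedup (cols.flatMap (fun c => c.2))
  keys.map (fun r => (r, (cols.filter (fun c => decide (r ∈ c.2))).map (fun c => c.1)))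

def build_holographic_tables_alt (factor_base : List Int) (levels : Option (List (List Int))) : (List (List (Int × List Int))) × List Int :=
  let lvls : List (List Int) :=
    match levels with
    | none => pvChunk3 factor_base
    | some ls => ls
  lvls.foldl
    (fun acc level =>
      if level = [] then (acc.1 ++ [([] : List (Int × List Int))], acc.2 ++ [(1 : Int)])
      else
        let prod := level.foldl (fun pr p => pr * p) 1
        (acc.1 ++ [pvLevelTable level prod], acc.2 ++ [prod]))
    ([], [])

-- ===== PRECONDITION & SPEC =====
-- Pre_ excludes inputs whose effective levels contain 0: there Python A (and B)
-- raises ValueError (range() arg 3 must not be zero); it excludes nothing A returns on.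
def Pre_build_holographic_tables (factor_base : List Int) (levels : Option (List (List Int))) : Prop :=
  ∀ l ∈ levels.getD [factor_base], (0 : Int) ∉ l
instance (factor_base : List Int) (levels : Option (List (List Int))) : Decidable (Pre_build_holographic_tables factor_base levels) := by unfold Pre_build_holographic_tables; infer_instance

def pvWitness_build_holographic_tables : List Int × Option (List (List Int)) := ([2, 3, 5, 7], none)

def Spec_build_holographic_tables (factor_base : List Int) (levels : Option (List (List Int))) (out : (List (List (Int × List Int))) × List Int) : Prop := out = build_holographic_tables_alt factor_base levels
instance (factor_base : List Int) (levels : Option (List (List Int))) (out : (List (List (Int × List Int))) × List Int) : Decidable (Spec_build_holographic_tables factor_base levels out) := by unfold Spec_build_holographic_tables; infer_instance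

-- ===== CLAIM (what is proved, stated in full; the proofs are below) =====
def Claim_equal_build_holographic_tables : Prop := ∀ (factor_base : List Int) (levels : Option (List (List Int))), Dom_build_holographic_tables factor_base levels → Pre_build_holographic_tables factor_base levels → Spec_build_holographic_tables factor_base levels (build_holographic_tables factor_base levels)

-- ===== LEMMAS AND PROOFS =====

theorem pvNodup_pyRange (a b s : Int) : (PySem.List.pyRange a b s).Nodup := by
  unfold PySem.List.pyRange
  split
  · exact List.nodup_nil
  · rename_i hs
    apply List.Nodup.map _ List.nodup_range
    intro x y h
    have h2 : (s * x : Int) = s * y := add_left_cancel h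
    exact_mod_cast mul_left_cancel₀ hs h2

theorem pvFilterFlat (L : List Int) (prod r : Int) :
    ((L.flatMap (fun p => (PySem.List.pyRange 0 prod p).map (fun x => (x, p)))).filter
        (fun pr => pr.1 == r)).map (fun pr => pr.2)
      = L.filter (fun q => decide (r ∈ PySem.List.pyRange 0 prod q)) := by
  induction L with
  | nil => simp
  | cons p L ih =>
    simp only [List.flatMap_cons, List.filter_append, List.map_append, ih, List.filter_cons,
      List.filter_map, Function.comp_def, List.map_map]
    have hc : (PySem.List.pyRange 0 prod p).filter (fun x => x == r)
        = List.replicate ((PySem.List.pyRange 0 prod p).count r) r :=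
      List.filter_beq r
    by_cases hm : r ∈ PySem.List.pyRange 0 prod p
    · simp [hc, List.count_eq_one_of_mem (pvNodup_pyRange 0 prod p) hm, hm]
    · simp [hc, List.count_eq_zero_of_not_mem hm, hm]

theorem pvLevelItems (L : List Int) (prod : Int) :
    (L.foldl
        (fun d p => (PySem.List.pyRange 0 prod p).foldl
          (fun (d : PySem.Dict Int (List Int)) r => d.modify r [] (fun v => v ++ [p])) d)
        PySem.Dict.empty).items
      = pvLevelTable L prod := by
  have hflat : L.foldl
        (fun d p => (PySem.List.pyRange 0 prod p).foldl
          (fun (d : PySem.Dict Int (List Int)) r => d.modify r [] (fun v => v ++ [p])) d)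
        PySem.Dict.empty
      = (L.flatMap (fun p => (PySem.List.pyRange 0 prod p).map (fun x => (x, p)))).foldl
          (fun d pr => d.modify pr.1 [] (fun v => v ++ [pr.2])) PySem.Dict.empty := by
    rw [List.foldl_flatMap]
    simp only [List.foldl_map]
  rw [hflat]
  set flat := L.flatMap (fun p => (PySem.List.pyRange 0 prod p).map (fun x => (x, p))) with hflatdef
  have hnodup : ((flat.foldl (fun (d : PySem.Dict Int (List Int)) pr =>
      d.modify pr.1 [] (fun v => v ++ [pr.2])) PySem.Dict.empty)).keys.Nodup := by
    apply PySem.Dict.nodup_keys_foldl_modify_key flat Prod.fst [] (fun _ pr v => v ++ [pr.2])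
    simp
  have hkeys : ((flat.foldl (fun (d : PySem.Dict Int (List Int)) pr =>
      d.modify pr.1 [] (fun v => v ++ [pr.2])) PySem.Dict.empty)).keys
      = PySem.List.dedup (L.flatMap (fun p => PySem.List.pyRange 0 prod p)) := by
    rw [PySem.Dict.keys_foldl_modify_key flat Prod.fst [] (fun _ pr v => v ++ [pr.2])]
    have : flat.map Prod.fst = L.flatMap (fun p => PySem.List.pyRange 0 prod p) := by
      simp [hflatdef, List.map_flatMap, List.map_map, Function.comp_def]
    rw [this]
    simp [PySem.List.dedup, PySem.Set.update_nil_left]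
  rw [PySem.Dict.items_eq_map_keys _ hnodup ([] : List Int), hkeys]
  unfold pvLevelTable
  simp only [List.flatMap_map, List.filter_map, List.map_map]
  apply List.map_congr_left
  intro r _
  rw [PySem.Dict.getD_foldl_modify_append flat PySem.Dict.empty r]
  rw [PySem.Dict.getD_empty]
  simp only [List.nil_append]
  rw [pvFilterFlat L prod r]
  simp [Function.comp_def]

theorem pvChunkNat (xs : List Int) :
    (List.range ((xs.length + 2) / 3)).map (fun k => (xs.drop (3 * k)).take 3) = pvChunk3 xs := by
  induction xs using pvChunk3.induct with
  | case1 => simp [pvChunk3]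
  | case2 xs h ih =>
    rw [pvChunk3]
    simp only [h, if_false]
    rw [PySem.List.slice_from _ (by norm_num)] at ih ⊢
    rw [PySem.List.slice_to _ (by norm_num)]
    simp only [List.length_drop] at ih
    have hn : xs.length ≠ 0 := by simp_all
    have hm : (xs.length + 2) / 3 = (xs.length - (3:Int).toNat + 2) / 3 + 1 := by omega
    rw [hm, List.range_succ_eq_map, List.map_cons, List.map_map]
    congr 1
    rw [← ih]
    apply List.map_congr_left
    intro k _
    simp only [Function.comp_apply, List.drop_drop]
    congr 2
    omega

theorem pvChunkEq (xs : List Int) :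
    (PySem.List.pyRange 0 (xs.length : Int) 3).map
        (fun i => PySem.List.slice xs (some i) (some (i + 3)))
      = pvChunk3 xs := by
  rw [PySem.List.pyRange_of_pos 0 (xs.length : Int) (by norm_num)]
  rw [← pvChunkNat xs]
  have hM : (if (0:Int) < (xs.length : Int)
      then (((xs.length : Int) - 0 + 3 - 1) / 3).toNat else 0) = (xs.length + 2) / 3 := by
    split_ifs with h
    · omega
    · omega
  rw [hM, List.map_map]
  apply List.map_congr_left
  intro k _
  simp only [Function.comp_apply, zero_add]
  rw [PySem.List.slice_toNat _ (by positivity) (by positivity)]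
  congr 1
  omega

theorem pvFoldEq (ls : List (List Int))
    (acc : (List (List (Int × List Int))) × List Int) :
    ls.foldl
      (fun acc level =>
        if level = [] then (acc.1 ++ [([] : List (Int × List Int))], acc.2 ++ [(1 : Int)])
        else
          let prod := level.foldl (fun pr p => pr * p) 1
          let rm := level.foldl
            (fun d p => (PySem.List.pyRange 0 prod p).foldl
              (fun (d : PySem.Dict Int (List Int)) r => d.modify r [] (fun v => v ++ [p])) d)
            PySem.Dict.empty
          (acc.1 ++ [rm.items], acc.2 ++ [prod])) acc
    = ls.foldl
      (fun acc level =>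
        if level = [] then (acc.1 ++ [([] : List (Int × List Int))], acc.2 ++ [(1 : Int)])
        else
          let prod := level.foldl (fun pr p => pr * p) 1
          (acc.1 ++ [pvLevelTable level prod], acc.2 ++ [prod])) acc := by
  induction ls generalizing acc with
  | nil => rfl
  | cons l ls ih =>
    simp only [List.foldl_cons]
    have hstep : (if l = [] then (acc.1 ++ [([] : List (Int × List Int))], acc.2 ++ [(1 : Int)])
        else
          let prod := l.foldl (fun pr p => pr * p) 1
          let rm := l.foldl
            (fun d p => (PySem.List.pyRange 0 prod p).foldl
              (fun (d : PySem.Dict Int (List Int)) r => d.modify r [] (fun v => v ++ [p])) d)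
            PySem.Dict.empty
          (acc.1 ++ [rm.items], acc.2 ++ [prod]))
        = (if l = [] then (acc.1 ++ [([] : List (Int × List Int))], acc.2 ++ [(1 : Int)])
          else
            let prod := l.foldl (fun pr p => pr * p) 1
            (acc.1 ++ [pvLevelTable l prod], acc.2 ++ [prod])) := by
      split_ifs with hl
      · rfl
      · simp only []
        rw [pvLevelItems l _]
    rw [hstep]
    exact ih _

-- ===== VERDICT (by name: the statement is the Claim_ definition above) =====
theorem build_holographic_tables_spec : Claim_equal_build_holographic_tables := by
  intro factor_base levels _hdom _hpre
  unfold Spec_build_holographic_tables build_holographic_tables build_holographic_tables_alt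
  cases levels with
  | none =>
    simp only []
    rw [pvChunkEq factor_base]
    exact pvFoldEq _ _
  | some ls =>
    exact pvFoldEq _ _
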